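-- pv_equiv track=rewrite | github.com/kketap/Ex-Py | Trabajos py/Airbnb Madrid/1.py | alojamientosDistritos
-- ===== SOURCE A (Python) =====
-- def alojamientosDistritos(alojamientos):
--
--     alojamientoDistritos = {}
--     for alojamiento in alojamientos:
--         if alojamiento['distrito'] in alojamientoDistritos.keys():
--             alojamientoDistritos[alojamiento['distrito']] += 1
--         else :
--             alojamientoDistritos[alojamiento['distrito']] = 1
--     return alojamientoDistritos
-- ===== SOURCE B (Python) =====
-- def alojamientosDistritos(alojamientos):
--     districts = [a['distrito'] for a in alojamientos]
--     return {d: districts.count(d) for d in dict.fromkeys(districts)}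
-- ===== Notes on version B (the rewrite author's own statement) =====
-- stated objective: idiomatic
-- what changed: Replaces the incremental key-test-and-accumulate dict loop by a distinct-keys-then-count comprehension: extract the district list once, dedup it in first-occurrence order with dict.fromkeys, and count each distinct district with list.count.
import Mathlib
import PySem

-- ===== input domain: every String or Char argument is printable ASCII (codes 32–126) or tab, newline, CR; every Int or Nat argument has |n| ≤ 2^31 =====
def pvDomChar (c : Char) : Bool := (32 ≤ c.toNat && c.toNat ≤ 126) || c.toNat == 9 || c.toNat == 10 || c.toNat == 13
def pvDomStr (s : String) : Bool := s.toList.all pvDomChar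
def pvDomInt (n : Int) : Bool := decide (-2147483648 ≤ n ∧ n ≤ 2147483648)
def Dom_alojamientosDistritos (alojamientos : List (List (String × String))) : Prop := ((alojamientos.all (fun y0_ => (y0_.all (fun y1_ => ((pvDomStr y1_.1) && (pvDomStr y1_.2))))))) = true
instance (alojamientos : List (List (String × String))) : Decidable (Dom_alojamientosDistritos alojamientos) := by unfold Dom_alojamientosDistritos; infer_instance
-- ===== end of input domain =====

-- B replaces A's incremental dict-accumulation loop by a distinct-districts-then-count comprehension; same result, different shape.


-- ===== PORT A =====
-- A: one pass, testing key membership and either incrementing or initialising to 1.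
def alojamientosDistritos (alojamientos : List (List (String × String))) : List (String × Int) :=
  (alojamientos.foldl (fun d a =>
      let k := (PySem.Dict.ofList a).getD "distrito" ""  -- a['distrito']; Pre_ guarantees the key is present
      if d.contains k then d.insert k (d.getD k 0 + 1) else d.insert k 1)
    PySem.Dict.empty).items

-- ===== PORT B =====
-- B: list of districts, ordered dedup (dict.fromkeys), then count each distinct district.
def alojamientosDistritos_alt (alojamientos : List (List (String × String))) : List (String × Int) :=
  let districts := alojamientos.map (fun a => (PySem.Dict.ofList a).getD "distrito" "")
  (PySem.List.dedup districts).map (fun d => (d, (districts.count d : Int)))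

-- ===== PRECONDITION & SPEC =====
-- Pre_ excludes exactly the inputs where some alojamiento lacks the key 'distrito', on which A raises KeyError.
def Pre_alojamientosDistritos (alojamientos : List (List (String × String))) : Prop :=
  (alojamientos.all (fun a => a.any (fun p => p.1 == "distrito"))) = true
instance (alojamientos : List (List (String × String))) : Decidable (Pre_alojamientosDistritos alojamientos) := by unfold Pre_alojamientosDistritos; infer_instance
def pvWitness_alojamientosDistritos : (List (List (String × String))) :=
  [[("distrito", "Centro")], [("distrito", "Salamanca"), ("zona", "n")], [("distrito", "Centro")]]
def Spec_alojamientosDistritos (alojamientos : List (List (String × String))) (out : List (String × Int)) : Prop := out = alojamientosDistritos_alt alojamientos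
instance (alojamientos : List (List (String × String))) (out : List (String × Int)) : Decidable (Spec_alojamientosDistritos alojamientos out) := by unfold Spec_alojamientosDistritos; infer_instance

-- ===== CLAIM (what is proved, stated in full; the proofs are below) =====
def Claim_equal_alojamientosDistritos : Prop := ∀ (alojamientos : List (List (String × String))), Dom_alojamientosDistritos alojamientos → Pre_alojamientosDistritos alojamientos → Spec_alojamientosDistritos alojamientos (alojamientosDistritos alojamientos)

-- ===== LEMMAS AND PROOFS =====

-- A's step function is the Counter step: in both branches it stores getD k 0 + 1.
lemma stepA_eq_counter_step (d : PySem.Dict String Int) (k : String) :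
    (if d.contains k then d.insert k (d.getD k 0 + 1) else d.insert k 1) =
      d.insert k (d.getD k 0 + 1) := by
  by_cases h : d.contains k = true
  · simp [h]
  · rw [if_neg (by simp [h]), PySem.Dict.getD_of_not_contains d 0 (by simpa using h)]
    norm_num

lemma portA_items_eq (als : List (List (String × String))) :
    (als.foldl (fun d a =>
        let k := (PySem.Dict.ofList a).getD "distrito" ""
        if d.contains k then d.insert k (d.getD k 0 + 1) else d.insert k 1)
      PySem.Dict.empty).items =
    (PySem.List.dedup (als.map (fun a => (PySem.Dict.ofList a).getD "distrito" ""))).map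
      (fun d => (d, ((als.map (fun a => (PySem.Dict.ofList a).getD "distrito" "")).count d : Int))) := by
  have hstep : (fun (d : PySem.Dict String Int) (a : List (String × String)) =>
      let k := (PySem.Dict.ofList a).getD "distrito" ""
      if d.contains k then d.insert k (d.getD k 0 + 1) else d.insert k 1) =
      fun d a => d.insert ((PySem.Dict.ofList a).getD "distrito" "")
        (d.getD ((PySem.Dict.ofList a).getD "distrito" "") 0 + 1) := by
    funext d a; exact stepA_eq_counter_step d _
  rw [hstep, show (List.foldl (fun (d : PySem.Dict String Int) a =>
        d.insert ((PySem.Dict.ofList a).getD "distrito" "")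
          (d.getD ((PySem.Dict.ofList a).getD "distrito" "") 0 + 1)) PySem.Dict.empty als) =
      (List.foldl (fun (d : PySem.Dict String Int) x => d.insert x (d.getD x 0 + 1))
        PySem.Dict.empty (als.map (fun a => (PySem.Dict.ofList a).getD "distrito" ""))) from
      (List.foldl_map (f := fun a => (PySem.Dict.ofList a).getD "distrito" "")
        (g := fun (d : PySem.Dict String Int) x => d.insert x (d.getD x 0 + 1))).symm, PySem.Dict.foldl_insert_getD_add_one_eq_counter,
    PySem.Dict.items_counter]
  simp [PySem.List.dedup_eq_ofList]

-- ===== VERDICT (by name: the statement is the Claim_ definition above) =====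
theorem alojamientosDistritos_spec : Claim_equal_alojamientosDistritos := by
  intro als _ _
  show alojamientosDistritos als = alojamientosDistritos_alt als
  exact portA_items_eq als
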